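-- pv_equiv track=rewrite | github.com/AlbGri/osservatorio-criminalita-next | scripts/generate_insights.py | is_tautological_pair
-- ===== SOURCE A (Python) =====
-- REATI_GERARCHIA_STRETTA = {
--     "THEFT": {  # Furti -> sotto-tipi
--         "BAGTHEF", "BURGTHEF", "PICKTHEF", "SHOPTHEF", "CARTHEF",
--         "VEHITHEF", "MOPETHEF", "MOTORTHEF", "TRUCKTHEF", "ARTTHEF",
--     },
--     "ROBBER": {  # Rapine -> sotto-tipi
--         "STREETROB", "HOUSEROB", "BANKROB", "SHOPROB", "POSTROB",
--     },
--     "ARSON": {"DAMARS"},  # Incendi -> incendi dolosi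
--     "INTENHOM": {"MAFIAHOM", "ROBBHOM", "INFANTHOM"},  # Omicidi volontari -> sotto-tipi
--     "RAPE": {"RAPEUN18"},  # Violenze sessuali -> atti sessuali con minorenne
-- }
--
-- def is_tautological_pair(code_a: str, code_b: str) -> bool:
--     """Verifica se due codici reato sono in relazione gerarchica."""
--     # TOT vs qualsiasi altro reato
--     if code_a == "TOT" or code_b == "TOT":
--         return True
--     # Genitore-figlio e fratelli nelle gerarchie strette
--     for parent, children in REATI_GERARCHIA_STRETTA.items():
--         if code_a == parent and code_b in children:
--             return True
--         if code_b == parent and code_a in children: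
--             return True
--         if code_a in children and code_b in children:
--             return True
--     return False
-- ===== SOURCE B (Python) =====
-- REATI_GERARCHIA_STRETTA = {
--     "THEFT": {
--         "BAGTHEF", "BURGTHEF", "PICKTHEF", "SHOPTHEF", "CARTHEF",
--         "VEHITHEF", "MOPETHEF", "MOTORTHEF", "TRUCKTHEF", "ARTTHEF",
--     },
--     "ROBBER": {
--         "STREETROB", "HOUSEROB", "BANKROB", "SHOPROB", "POSTROB",
--     },
--     "ARSON": {"DAMARS"},
--     "INTENHOM": {"MAFIAHOM", "ROBBHOM", "INFANTHOM"},
--     "RAPE": {"RAPEUN18"},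
-- }
--
-- # Inverse index built once: child code -> its (unique) parent code.
-- PARENT_OF = {
--     child: parent
--     for parent, children in REATI_GERARCHIA_STRETTA.items()
--     for child in children
-- }
--
--
-- def is_tautological_pair(code_a: str, code_b: str) -> bool:
--     """Verifica se due codici reato sono in relazione gerarchica."""
--     if code_a == "TOT" or code_b == "TOT":
--         return True
--     pa = PARENT_OF.get(code_a)
--     pb = PARENT_OF.get(code_b)
--     return pb == code_a or pa == code_b or (pa is not None and pa == pb)
-- ===== Notes on version B (the rewrite author's own statement) =====
-- stated objective: simpler
-- what changed: Replaces the per-call scan over every (parent, children) group with a child-to-parent inverse index built once; the function becomes the TOT short-circuit plus two O(1) lookups and three comparisons.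
import Mathlib
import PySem

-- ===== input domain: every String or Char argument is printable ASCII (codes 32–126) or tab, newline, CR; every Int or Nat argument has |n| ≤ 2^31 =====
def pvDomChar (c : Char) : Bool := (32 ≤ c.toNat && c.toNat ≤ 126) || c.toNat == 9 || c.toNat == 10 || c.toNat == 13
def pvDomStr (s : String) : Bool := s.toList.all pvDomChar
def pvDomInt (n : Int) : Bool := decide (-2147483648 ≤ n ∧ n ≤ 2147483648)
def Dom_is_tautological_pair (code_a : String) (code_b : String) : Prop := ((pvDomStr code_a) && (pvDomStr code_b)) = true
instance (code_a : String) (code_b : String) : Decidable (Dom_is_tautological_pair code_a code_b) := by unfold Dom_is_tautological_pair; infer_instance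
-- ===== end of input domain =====

-- B replaces A's per-call scan over the hierarchy groups with a prebuilt child->parent
-- inverse index and two lookups plus three comparisons (objective: simpler).


-- ===== PORT A =====
-- REATI_GERARCHIA_STRETTA: dict of sets → assoc list of (parent, PySem.Set of children)
def pvHier : List (String × PySem.Set String) :=
  [("THEFT", ["BAGTHEF", "BURGTHEF", "PICKTHEF", "SHOPTHEF", "CARTHEF",
              "VEHITHEF", "MOPETHEF", "MOTORTHEF", "TRUCKTHEF", "ARTTHEF"]),
   ("ROBBER", ["STREETROB", "HOUSEROB", "BANKROB", "SHOPROB", "POSTROB"]),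
   ("ARSON", ["DAMARS"]),
   ("INTENHOM", ["MAFIAHOM", "ROBBHOM", "INFANTHOM"]),
   ("RAPE", ["RAPEUN18"])]

-- the 'for parent, children in REATI_GERARCHIA_STRETTA.items():' loop with its early returns
def pvLoopA (a b : String) : List (String × PySem.Set String) → Bool
  | [] => false
  | (parent, children) :: rest =>
    if a == parent && PySem.Set.contains children b then true
    else if b == parent && PySem.Set.contains children a then true
    else if PySem.Set.contains children a && PySem.Set.contains children b then true
    else pvLoopA a b rest

def is_tautological_pair (code_a : String) (code_b : String) : Bool :=
  if code_a == "TOT" || code_b == "TOT" then true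
  else pvLoopA code_a code_b pvHier

-- ===== PORT B =====
-- PARENT_OF = {child: parent for parent, children in REATI_GERARCHIA_STRETTA.items() for child in children}
def pvParentOf : PySem.Dict String String :=
  PySem.Dict.ofList (pvHier.flatMap (fun pc => pc.2.map (fun c => (c, pc.1))))

def is_tautological_pair_alt (code_a : String) (code_b : String) : Bool :=
  if code_a == "TOT" || code_b == "TOT" then true
  else
    let pa := PySem.Dict.get? pvParentOf code_a
    let pb := PySem.Dict.get? pvParentOf code_b
    pb == some code_a || pa == some code_b || (pa.isSome && pa == pb)

-- ===== PRECONDITION & SPEC =====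
def Spec_is_tautological_pair (code_a : String) (code_b : String) (out : Bool) : Prop := out = is_tautological_pair_alt code_a code_b
instance (code_a : String) (code_b : String) (out : Bool) : Decidable (Spec_is_tautological_pair code_a code_b out) := by unfold Spec_is_tautological_pair; infer_instance

-- ===== CLAIM (what is proved, stated in full; the proofs are below) =====
def Claim_equal_is_tautological_pair : Prop := ∀ (code_a : String) (code_b : String), Dom_is_tautological_pair code_a code_b → Spec_is_tautological_pair code_a code_b (is_tautological_pair code_a code_b)

-- ===== LEMMAS AND PROOFS =====
-- every code either program ever compares against: "TOT", the five parents, the 20 children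
def pvAllCodes : List String :=
  ["TOT", "THEFT", "ROBBER", "ARSON", "INTENHOM", "RAPE",
   "BAGTHEF", "BURGTHEF", "PICKTHEF", "SHOPTHEF", "CARTHEF",
   "VEHITHEF", "MOPETHEF", "MOTORTHEF", "TRUCKTHEF", "ARTTHEF",
   "STREETROB", "HOUSEROB", "BANKROB", "SHOPROB", "POSTROB",
   "DAMARS", "MAFIAHOM", "ROBBHOM", "INFANTHOM", "RAPEUN18"]

-- the inverse index, evaluated to its literal association list
def pvPairs : List (String × String) :=
  [("BAGTHEF", "THEFT"), ("BURGTHEF", "THEFT"), ("PICKTHEF", "THEFT"), ("SHOPTHEF", "THEFT"),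
   ("CARTHEF", "THEFT"), ("VEHITHEF", "THEFT"), ("MOPETHEF", "THEFT"), ("MOTORTHEF", "THEFT"),
   ("TRUCKTHEF", "THEFT"), ("ARTTHEF", "THEFT"), ("STREETROB", "ROBBER"), ("HOUSEROB", "ROBBER"),
   ("BANKROB", "ROBBER"), ("SHOPROB", "ROBBER"), ("POSTROB", "ROBBER"), ("DAMARS", "ARSON"),
   ("MAFIAHOM", "INTENHOM"), ("ROBBHOM", "INTENHOM"), ("INFANTHOM", "INTENHOM"), ("RAPEUN18", "RAPE")]

lemma pvParentOf_eq : pvParentOf = PySem.Dict.mk pvPairs := by decide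

set_option maxHeartbeats 4000000 in
lemma pvBothMem : ∀ a ∈ pvAllCodes, ∀ b ∈ pvAllCodes,
    is_tautological_pair a b = is_tautological_pair_alt a b := by decide

lemma pvLoopA_nonmem_left (a b : String) (ha : a ∉ pvAllCodes) :
    pvLoopA a b pvHier = false := by
  simp only [pvAllCodes, List.mem_cons, List.not_mem_nil, or_false, not_or] at ha
  obtain ⟨h1, h2, h3, h4, h5, h6, h7, h8, h9, h10, h11, h12, h13, h14, h15, h16,
    h17, h18, h19, h20, h21, h22, h23, h24, h25, h26⟩ := ha
  simp [pvLoopA, pvHier, PySem.Set.contains, h2, h3, h4, h5, h6, h7, h8, h9, h10,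
    h11, h12, h13, h14, h15, h16, h17, h18, h19, h20, h21, h22, h23, h24, h25, h26]

lemma pvLoopA_nonmem_right (a b : String) (hb : b ∉ pvAllCodes) :
    pvLoopA a b pvHier = false := by
  simp only [pvAllCodes, List.mem_cons, List.not_mem_nil, or_false, not_or] at hb
  obtain ⟨h1, h2, h3, h4, h5, h6, h7, h8, h9, h10, h11, h12, h13, h14, h15, h16,
    h17, h18, h19, h20, h21, h22, h23, h24, h25, h26⟩ := hb
  simp [pvLoopA, pvHier, PySem.Set.contains, h2, h3, h4, h5, h6, h7, h8, h9, h10,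
    h11, h12, h13, h14, h15, h16, h17, h18, h19, h20, h21, h22, h23, h24, h25, h26]

-- a code outside pvAllCodes has no parent in the index
lemma pvGet_nonmem (a : String) (ha : a ∉ pvAllCodes) :
    PySem.Dict.get? pvParentOf a = none := by
  simp only [pvAllCodes, List.mem_cons, List.not_mem_nil, or_false, not_or] at ha
  obtain ⟨h1, h2, h3, h4, h5, h6, h7, h8, h9, h10, h11, h12, h13, h14, h15, h16,
    h17, h18, h19, h20, h21, h22, h23, h24, h25, h26⟩ := ha
  rw [pvParentOf_eq]
  simp [PySem.Dict.get?, Ne.symm h7, Ne.symm h8, Ne.symm h9, Ne.symm h10, Ne.symm h11,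
    Ne.symm h12, Ne.symm h13, Ne.symm h14, Ne.symm h15, Ne.symm h16, Ne.symm h17,
    Ne.symm h18, Ne.symm h19, Ne.symm h20, Ne.symm h21, Ne.symm h22, Ne.symm h23,
    Ne.symm h24, Ne.symm h25, Ne.symm h26]
  intro p q hm
  fin_cases hm <;> simp_all [ne_comm]

-- the index's values are parents, so a code outside pvAllCodes is never a looked-up parent
lemma pvGet_ne (x b : String) (hb : b ∉ pvAllCodes) :
    (PySem.Dict.get? pvParentOf x == some b) = false := by
  simp only [pvAllCodes, List.mem_cons, List.not_mem_nil, or_false, not_or] at hb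
  obtain ⟨h1, h2, h3, h4, h5, h6, -⟩ := hb
  rw [pvParentOf_eq]
  simp only [PySem.Dict.get?]
  cases hf : List.find? (fun p => p.1 == x) pvPairs with
  | none => simp [hf]
  | some p =>
    have hm := List.mem_of_find?_eq_some hf
    fin_cases hm <;> simp [Ne.symm h2, Ne.symm h3, Ne.symm h4, Ne.symm h5, Ne.symm h6]

lemma pvMain (a b : String) : is_tautological_pair a b = is_tautological_pair_alt a b := by
  by_cases ha : a ∈ pvAllCodes
  · by_cases hb : b ∈ pvAllCodes
    · exact pvBothMem a ha b hb
    · -- b unknown: A's loop finds nothing; B sees pb = none and never matches b as a parent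
      have hbT : ¬ b = "TOT" := by
        intro h; exact hb (h ▸ by decide)
      simp only [is_tautological_pair, is_tautological_pair_alt,
        pvLoopA_nonmem_right a b hb, pvGet_nonmem b hb, pvGet_ne a b hb]
      cases hpa : PySem.Dict.get? pvParentOf a <;> simp [hbT]
  · -- a unknown: symmetric
    have haT : ¬ a = "TOT" := by
      intro h; exact ha (h ▸ by decide)
    simp only [is_tautological_pair, is_tautological_pair_alt,
      pvLoopA_nonmem_left a b ha, pvGet_nonmem a ha, pvGet_ne b a ha]
    simp [haT]

-- ===== VERDICT (by name: the statement is the Claim_ definition above) =====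
theorem is_tautological_pair_spec : Claim_equal_is_tautological_pair := by
  intro a b _
  exact pvMain a b
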